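-- pv_equiv track=rewrite | github.com/metric-space-ai/ctox | tools/agent-runtime/skills/src/assets/samples/discovery-graph/scripts/discovery_store.py | capture_time_bounds
-- ===== SOURCE A (Python) =====
-- from typing import Any, Dict, Optional
--
-- def capture_time_bounds(captures: list[dict[str, Any]]) -> tuple[Optional[str], Optional[str]]:
--     started_candidates = [
--         item.get("started_at") for item in captures if item.get("started_at")
--     ]
--     finished_candidates = [
--         item.get("finished_at") for item in captures if item.get("finished_at")
--     ]
--     started_at = min(started_candidates) if started_candidates else None
--     finished_at = max(finished_candidates) if finished_candidates else None
--     return started_at, finished_at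
-- ===== SOURCE B (Python) =====
-- def capture_time_bounds(captures):
--     started_at = None
--     finished_at = None
--     for item in captures:
--         started = item.get("started_at")
--         if started:
--             started_at = started if started_at is None else min(started_at, started)
--         finished = item.get("finished_at")
--         if finished:
--             finished_at = finished if finished_at is None else max(finished_at, finished)
--     return started_at, finished_at
-- ===== Notes on version B (the rewrite author's own statement) =====
-- stated objective: alternative
-- what changed: A builds two filtered candidate lists and calls min()/max() on them; B makes a single pass over captures maintaining running min/max accumulators, building no intermediate lists.
import Mathlib
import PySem

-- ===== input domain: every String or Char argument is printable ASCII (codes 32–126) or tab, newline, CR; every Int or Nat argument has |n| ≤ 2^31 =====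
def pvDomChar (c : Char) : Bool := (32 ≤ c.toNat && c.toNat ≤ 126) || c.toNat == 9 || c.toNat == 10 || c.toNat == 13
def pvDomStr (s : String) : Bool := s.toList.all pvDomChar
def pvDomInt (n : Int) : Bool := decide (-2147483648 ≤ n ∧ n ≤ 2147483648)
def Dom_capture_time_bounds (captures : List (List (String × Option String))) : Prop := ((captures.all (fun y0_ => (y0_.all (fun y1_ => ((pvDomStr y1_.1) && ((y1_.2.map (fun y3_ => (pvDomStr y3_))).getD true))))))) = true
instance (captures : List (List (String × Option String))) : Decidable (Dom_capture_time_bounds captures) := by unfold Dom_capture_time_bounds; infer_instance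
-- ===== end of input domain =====

-- B replaces A's two filtered candidate lists + min()/max() with a single pass keeping running min/max accumulators (alternative decomposition, same cost).


-- ===== PORT A =====
-- item.get(key): first-match association lookup; a stored None and a missing key both give None (join)
def ctbGet (item : List (String × Option String)) (key : String) : Option String :=
  ((PySem.Dict.mk item).get? key).join

-- 'item.get(key) if item.get(key) else nothing': the truthy-filtered candidate one item contributes
def ctbCand1 (item : List (String × Option String)) (key : String) : Option String :=
  match ctbGet item key with
  | some s => if s = "" then none else some s
  | none => none

-- [item.get(key) for item in captures if item.get(key)]
def ctbCandidates (key : String) (captures : List (List (String × Option String))) : List String :=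
  captures.filterMap (fun item => ctbCand1 item key)

def capture_time_bounds (captures : List (List (String × Option String))) : Option String × Option String :=
  let started_candidates := ctbCandidates "started_at" captures
  let finished_candidates := ctbCandidates "finished_at" captures
  let started_at := if started_candidates = [] then none
    else PySem.List.min? started_candidates (fun y => y)
  let finished_at := if finished_candidates = [] then none
    else PySem.List.max? finished_candidates (fun y => y)
  (started_at, finished_at)

-- ===== PORT B =====
-- the body of B's single loop: update both running accumulators from one item
def ctbStep (acc : Option String × Option String) (item : List (String × Option String)) :
    Option String × Option String :=
  let started := ctbGet item "started_at"
  let started_at :=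
    match started with
    | some v =>
      if v = "" then acc.1
      else match acc.1 with
        | none => some v
        | some cur => some (min cur v)
    | none => acc.1
  let finished := ctbGet item "finished_at"
  let finished_at :=
    match finished with
    | some v =>
      if v = "" then acc.2
      else match acc.2 with
        | none => some v
        | some cur => some (max cur v)
    | none => acc.2
  (started_at, finished_at)

def capture_time_bounds_alt (captures : List (List (String × Option String))) : Option String × Option String :=
  captures.foldl ctbStep (none, none)

-- ===== PRECONDITION & SPEC =====
def Spec_capture_time_bounds (captures : List (List (String × Option String))) (out : Option String × Option String) : Prop := out = capture_time_bounds_alt captures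
instance (captures : List (List (String × Option String))) (out : Option String × Option String) : Decidable (Spec_capture_time_bounds captures out) := by unfold Spec_capture_time_bounds; infer_instance

-- ===== CLAIM (what is proved, stated in full; the proofs are below) =====
def Claim_equal_capture_time_bounds : Prop := ∀ (captures : List (List (String × Option String))), Dom_capture_time_bounds captures → Spec_capture_time_bounds captures (capture_time_bounds captures)

-- ===== LEMMAS AND PROOFS =====

-- running-min / running-max accumulator steps (what B maintains per candidate)
def optMinStep (a : Option String) (v : String) : Option String :=
  match a with | none => some v | some c => some (min c v)

def optMaxStep (a : Option String) (v : String) : Option String :=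
  match a with | none => some v | some c => some (max c v)

lemma min?_as_fold (xs : List String) :
    (if xs = [] then none else PySem.List.min? xs (fun y => y)) = xs.foldl optMinStep none := by
  cases xs with
  | nil => rfl
  | cons x t =>
    rw [if_neg (List.cons_ne_nil x t)]
    unfold PySem.List.min?
    apply List.foldl_ext
    intro acc y _
    cases acc with
    | none => rfl
    | some m =>
      by_cases h : y < m
      · have hm : min m y = y := min_eq_right h.le
        simp [optMinStep, h, hm]
      · have hm : min m y = m := min_eq_left (not_lt.mp h)
        simp [optMinStep, h, hm]

lemma max?_as_fold (xs : List String) :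
    (if xs = [] then none else PySem.List.max? xs (fun y => y)) = xs.foldl optMaxStep none := by
  cases xs with
  | nil => rfl
  | cons x t =>
    rw [if_neg (List.cons_ne_nil x t)]
    unfold PySem.List.max?
    apply List.foldl_ext
    intro acc y _
    cases acc with
    | none => rfl
    | some m =>
      by_cases h : m < y
      · have hm : max m y = y := max_eq_right h.le
        simp [optMaxStep, h, hm]
      · have hm : max m y = m := max_eq_left (not_lt.mp h)
        simp [optMaxStep, h, hm]

-- one loop iteration of B = consuming each key's candidate (if any) with its accumulator step
lemma ctbStep_eq (acc : Option String × Option String) (item : List (String × Option String)) :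
    ctbStep acc item =
      ((ctbCand1 item "started_at").elim acc.1 (optMinStep acc.1),
       (ctbCand1 item "finished_at").elim acc.2 (optMaxStep acc.2)) := by
  unfold ctbStep ctbCand1
  cases hs : ctbGet item "started_at" <;> cases hf : ctbGet item "finished_at" <;>
    simp only [Option.elim] <;>
    first
      | rfl
      | (split_ifs <;> cases acc.1 <;> cases acc.2 <;> simp [optMinStep, optMaxStep])

-- B's fused loop splits into the two candidate folds
lemma alt_fold_split (captures : List (List (String × Option String)))
    (a b : Option String) :
    captures.foldl ctbStep (a, b)
    = ((ctbCandidates "started_at" captures).foldl optMinStep a,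
       (ctbCandidates "finished_at" captures).foldl optMaxStep b) := by
  induction captures generalizing a b with
  | nil => rfl
  | cons item t ih =>
    rw [List.foldl_cons, ctbStep_eq, ih]
    simp only [ctbCandidates, List.filterMap_cons]
    cases h1 : ctbCand1 item "started_at" <;> cases h2 : ctbCand1 item "finished_at" <;>
      simp [h1, h2]

-- ===== VERDICT (by name: the statement is the Claim_ definition above) =====
theorem capture_time_bounds_spec : Claim_equal_capture_time_bounds := by
  intro captures _
  show capture_time_bounds captures = capture_time_bounds_alt captures
  unfold capture_time_bounds capture_time_bounds_alt
  rw [alt_fold_split]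
  exact congrArg₂ Prod.mk (min?_as_fold _) (max?_as_fold _)
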